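-- pv_equiv track=rewrite | github.com/HadjSassi/geekshack3 | scode/KoalaCoders/prob20/main.py | can_win_in_next_move
-- ===== SOURCE A (Python) =====
-- def can_win_in_next_move(matrix, player):
--     rows = len(matrix)
--     cols = len(matrix[0])
--
--     def check_line(row, col, dr, dc):
--         for _ in range(3):
--             row += dr
--             col += dc
--             if not (0 <= row < rows and 0 <= col < cols) or matrix[row][col] != player:
--                 return False
--         return True
--
--     for row in range(rows):
--         for col in range(cols):
--             if matrix[row][col] == 0:
--                 if col <= cols - 4 and check_line(row, col, 0, 1):
--                     return True
--                 if row <= rows - 4 and check_line(row, col, 1, 0):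
--                     return True
--                 if row <= rows - 4 and col <= cols - 4 and check_line(row, col, 1, 1):
--                     return True
--                 if row >= 3 and col <= cols - 4 and check_line(row, col, -1, 1):
--                     return True
--
--     return False
-- ===== SOURCE B (Python) =====
-- def can_win_in_next_move(matrix, player):
--     rows = len(matrix)
--     cols = len(matrix[0])
--
--     # One run-length table per direction: run[(r, c)] = length of the maximal
--     # streak of `player` cells starting at (r, c) and going in direction (dr, dc).
--     # Cells are visited opposite to the direction, so the lookahead value exists;
--     # off-board or non-player cells are simply absent (treated as 0).
--     tables = []
--     for dr, dc in ((0, 1), (1, 0), (1, 1), (-1, 1)):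
--         run = {}
--         row_iter = range(rows) if dr < 0 else range(rows - 1, -1, -1)
--         for r in row_iter:
--             for c in range(cols - 1, -1, -1):
--                 if matrix[r][c] == player:
--                     run[(r, c)] = 1 + run.get((r + dr, c + dc), 0)
--         tables.append((dr, dc, run))
--
--     # A move at an empty cell wins iff some direction already carries a streak
--     # of at least 3 starting right next to it.
--     for r in range(rows):
--         for c in range(cols):
--             if matrix[r][c] == 0:
--                 for dr, dc, run in tables:
--                     if run.get((r + dr, c + dc), 0) >= 3:
--                         return True
--     return False
-- ===== Notes on version B (the rewrite author's own statement) =====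
-- stated objective: alternative
-- what changed: Replaces A's per-empty-cell 3-step directional probing (with window-fit guards) by four precomputed run-length tables, one per direction, filled opposite to the direction, followed by a scan that tests each empty cell's neighbour for a run of at least 3.
-- outside the precondition, e.g. on can_win_in_next_move([[0, 1, 1, 1], [1]], 1): A returns True, B raises IndexError; on can_win_in_next_move([], 1): A raises IndexError, B raises IndexError
import Mathlib
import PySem

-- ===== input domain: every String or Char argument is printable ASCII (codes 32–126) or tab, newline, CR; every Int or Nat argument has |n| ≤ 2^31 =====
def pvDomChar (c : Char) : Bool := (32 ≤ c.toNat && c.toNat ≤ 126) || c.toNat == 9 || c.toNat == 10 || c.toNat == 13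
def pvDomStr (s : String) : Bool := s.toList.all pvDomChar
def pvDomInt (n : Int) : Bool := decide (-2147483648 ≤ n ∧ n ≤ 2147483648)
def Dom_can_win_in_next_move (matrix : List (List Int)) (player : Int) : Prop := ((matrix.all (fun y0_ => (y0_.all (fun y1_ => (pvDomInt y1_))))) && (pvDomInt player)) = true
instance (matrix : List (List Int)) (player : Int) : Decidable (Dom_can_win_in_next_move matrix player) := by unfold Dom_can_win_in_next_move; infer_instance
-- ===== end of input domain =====

-- B replaces A's per-empty-cell directional probing by four run-length tables
-- (one dict per direction, filled opposite to the direction) plus a neighbour-lookup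
-- scan; alternative decomposition, same asymptotic cost.

-- ===== PORT A =====
-- matrix[r][c] for indices already known to be in range (both Pythons only read in-range cells inside Pre_)
def pvCell (matrix : List (List Int)) (r c : Int) : Int :=
  (matrix.getD r.toNat []).getD c.toNat 0

-- A's check_line: three steps of (row += dr; col += dc; bounds-and-player test)
def pvCheckLine (matrix : List (List Int)) (rows cols player : Int) :
    Nat → Int → Int → Int → Int → Bool
  | 0, _, _, _, _ => true
  | n + 1, row, col, dr, dc =>
    if ¬(0 ≤ row + dr ∧ row + dr < rows ∧ 0 ≤ col + dc ∧ col + dc < cols) ∨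
        pvCell matrix (row + dr) (col + dc) ≠ player then false
    else pvCheckLine matrix rows cols player n (row + dr) (col + dc) dr dc

def can_win_in_next_move (matrix : List (List Int)) (player : Int) : Bool :=
  let rows : Int := matrix.length
  let cols : Int := matrix.headI.length
  (PySem.List.pyRange 0 rows 1).any fun row =>
    (PySem.List.pyRange 0 cols 1).any fun col =>
      pvCell matrix row col == 0 &&
      ((decide (col ≤ cols - 4) && pvCheckLine matrix rows cols player 3 row col 0 1) ||
       (decide (row ≤ rows - 4) && pvCheckLine matrix rows cols player 3 row col 1 0) ||
       (decide (row ≤ rows - 4) && decide (col ≤ cols - 4) &&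
          pvCheckLine matrix rows cols player 3 row col 1 1) ||
       (decide (3 ≤ row) && decide (col ≤ cols - 4) &&
          pvCheckLine matrix rows cols player 3 row col (-1) 1))

-- ===== PORT B =====
-- one table-update step: run[(r,c)] = 1 + run.get((r+dr,c+dc), 0) for player cells
def pvRunStep (matrix : List (List Int)) (player dr dc : Int)
    (run : PySem.Dict (Int × Int) Int) (rc : Int × Int) : PySem.Dict (Int × Int) Int :=
  if pvCell matrix rc.1 rc.2 = player then
    run.insert rc (1 + run.getD (rc.1 + dr, rc.2 + dc) 0)
  else run

def pvRunTable (matrix : List (List Int)) (player rows cols dr dc : Int) :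
    PySem.Dict (Int × Int) Int :=
  let rowIter := if dr < 0 then PySem.List.pyRange 0 rows 1
                 else PySem.List.pyRange (rows - 1) (-1) (-1)
  rowIter.foldl (fun run r =>
    (PySem.List.pyRange (cols - 1) (-1) (-1)).foldl
      (fun run c => pvRunStep matrix player dr dc run (r, c)) run) PySem.Dict.empty

def can_win_in_next_move_alt (matrix : List (List Int)) (player : Int) : Bool :=
  let rows : Int := matrix.length
  let cols : Int := matrix.headI.length
  let tables := ([(0, 1), (1, 0), (1, 1), (-1, 1)] : List (Int × Int)).map
    (fun d => (d.1, d.2, pvRunTable matrix player rows cols d.1 d.2))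
  (PySem.List.pyRange 0 rows 1).any fun r =>
    (PySem.List.pyRange 0 cols 1).any fun c =>
      pvCell matrix r c == 0 &&
      tables.any (fun t => decide (3 ≤ t.2.2.getD (r + t.1, c + t.2.1) 0))

-- ===== PRECONDITION & SPEC =====
-- Pre_ excludes the empty matrix (A raises IndexError on matrix[0]) and ragged
-- matrices with a row shorter than row 0: there A raises IndexError unless it
-- finds a win before reaching the short row, while B (which scans the whole
-- board first to build its tables) always raises.
def Pre_can_win_in_next_move (matrix : List (List Int)) (player : Int) : Prop :=
  matrix ≠ [] ∧ ∀ row ∈ matrix, matrix.headI.length ≤ row.length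

instance (matrix : List (List Int)) (player : Int) :
    Decidable (Pre_can_win_in_next_move matrix player) := by
  unfold Pre_can_win_in_next_move; infer_instance

def pvWitness_can_win_in_next_move : List (List Int) × Int := ([[0, 1, 1, 1]], 1)

def Spec_can_win_in_next_move (matrix : List (List Int)) (player : Int) (out : Bool) : Prop :=
  out = can_win_in_next_move_alt matrix player
instance (matrix : List (List Int)) (player : Int) (out : Bool) :
    Decidable (Spec_can_win_in_next_move matrix player out) := by
  unfold Spec_can_win_in_next_move; infer_instance

-- ===== CLAIM (what is proved, stated in full; the proofs are below) =====
def Claim_equal_can_win_in_next_move : Prop :=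
  ∀ (matrix : List (List Int)) (player : Int), Dom_can_win_in_next_move matrix player →
    Pre_can_win_in_next_move matrix player →
    Spec_can_win_in_next_move matrix player (can_win_in_next_move matrix player)

-- ===== LEMMAS AND PROOFS =====

-- mathematical run length in direction (dr,dc) (only used for dr,dc where it terminates)
def pvRunLen (matrix : List (List Int)) (player rows cols dr dc : Int) (r c : Int) : Int :=
  if h : (0 < dr ∨ dr < 0 ∨ 0 < dc) ∧
      0 ≤ r ∧ r < rows ∧ 0 ≤ c ∧ c < cols ∧ pvCell matrix r c = player then
    1 + pvRunLen matrix player rows cols dr dc (r + dr) (c + dc)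
  else 0
termination_by ((if 0 < dr then rows - r else if dr < 0 then r + 1 else 0) +
    (if 0 < dc then cols - c else 0)).toNat
decreasing_by
  split_ifs <;> omega


-- in-bounds player cell
abbrev pvG (matrix : List (List Int)) (player rows cols r c : Int) : Prop :=
  0 ≤ r ∧ r < rows ∧ 0 ≤ c ∧ c < cols ∧ pvCell matrix r c = player

theorem pvRunLen_nonneg (matrix : List (List Int)) (player rows cols dr dc r c : Int) :
    0 ≤ pvRunLen matrix player rows cols dr dc r c := by
  fun_induction pvRunLen <;> omega

theorem pvRunLen_eq (matrix : List (List Int)) (player rows cols dr dc r c : Int)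
    (hd : 0 < dr ∨ dr < 0 ∨ 0 < dc) :
    pvRunLen matrix player rows cols dr dc r c =
      if pvG matrix player rows cols r c then
        1 + pvRunLen matrix player rows cols dr dc (r + dr) (c + dc)
      else 0 := by
  rw [pvRunLen]
  unfold pvG
  split_ifs with h1 h2 <;> tauto

theorem pvRunLen_ge3 (matrix : List (List Int)) (player rows cols dr dc r c : Int)
    (hd : 0 < dr ∨ dr < 0 ∨ 0 < dc) :
    3 ≤ pvRunLen matrix player rows cols dr dc r c ↔
      pvG matrix player rows cols r c ∧
      pvG matrix player rows cols (r + dr) (c + dc) ∧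
      pvG matrix player rows cols (r + dr + dr) (c + dc + dc) := by
  have hn := pvRunLen_nonneg matrix player rows cols dr dc (r + dr + dr + dr) (c + dc + dc + dc)
  rw [pvRunLen_eq _ _ _ _ _ _ _ _ hd, pvRunLen_eq _ _ _ _ _ _ _ _ hd,
      pvRunLen_eq _ _ _ _ _ _ _ _ hd]
  split_ifs with h1 h2 h3 <;> constructor <;> intro h <;> first | tauto | omega


theorem pvCheckLine_eq3 (matrix : List (List Int)) (rows cols player row col dr dc : Int) :
    pvCheckLine matrix rows cols player 3 row col dr dc = true ↔
      pvG matrix player rows cols (row + dr) (col + dc) ∧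
      pvG matrix player rows cols (row + dr + dr) (col + dc + dc) ∧
      pvG matrix player rows cols (row + dr + dr + dr) (col + dc + dc + dc) := by
  show pvCheckLine matrix rows cols player (2 + 1) row col dr dc = true ↔ _
  rw [pvCheckLine]
  show _ = true ↔ _
  by_cases h1 : pvG matrix player rows cols (row + dr) (col + dc)
  · have hb : ¬(¬(0 ≤ row + dr ∧ row + dr < rows ∧ 0 ≤ col + dc ∧ col + dc < cols) ∨
        pvCell matrix (row + dr) (col + dc) ≠ player) := by unfold pvG at h1; tauto
    rw [if_neg hb]
    show pvCheckLine matrix rows cols player (1 + 1) (row + dr) (col + dc) dr dc = true ↔ _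
    rw [pvCheckLine]
    by_cases h2 : pvG matrix player rows cols (row + dr + dr) (col + dc + dc)
    · have hb2 : ¬(¬(0 ≤ row + dr + dr ∧ row + dr + dr < rows ∧ 0 ≤ col + dc + dc ∧
          col + dc + dc < cols) ∨ pvCell matrix (row + dr + dr) (col + dc + dc) ≠ player) := by
        unfold pvG at h2; tauto
      rw [if_neg hb2]
      show pvCheckLine matrix rows cols player (0 + 1) (row + dr + dr) (col + dc + dc) dr dc
          = true ↔ _
      rw [pvCheckLine]
      by_cases h3 : pvG matrix player rows cols (row + dr + dr + dr) (col + dc + dc + dc)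
      · have hb3 : ¬(¬(0 ≤ row + dr + dr + dr ∧ row + dr + dr + dr < rows ∧
            0 ≤ col + dc + dc + dc ∧ col + dc + dc + dc < cols) ∨
            pvCell matrix (row + dr + dr + dr) (col + dc + dc + dc) ≠ player) := by
          unfold pvG at h3; tauto
        rw [if_neg hb3]
        show pvCheckLine matrix rows cols player 0 _ _ dr dc = true ↔ _
        rw [pvCheckLine]
        exact ⟨fun _ => ⟨h1, h2, h3⟩, fun _ => rfl⟩
      · have hb3 : (¬(0 ≤ row + dr + dr + dr ∧ row + dr + dr + dr < rows ∧
            0 ≤ col + dc + dc + dc ∧ col + dc + dc + dc < cols) ∨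
            pvCell matrix (row + dr + dr + dr) (col + dc + dc + dc) ≠ player) := by
          unfold pvG at h3; tauto
        rw [if_pos hb3]
        simp [h3]
    · have hb2 : (¬(0 ≤ row + dr + dr ∧ row + dr + dr < rows ∧ 0 ≤ col + dc + dc ∧
          col + dc + dc < cols) ∨ pvCell matrix (row + dr + dr) (col + dc + dc) ≠ player) := by
        unfold pvG at h2; tauto
      rw [if_pos hb2]
      simp [h2]
  · have hb : (¬(0 ≤ row + dr ∧ row + dr < rows ∧ 0 ≤ col + dc ∧ col + dc < cols) ∨
        pvCell matrix (row + dr) (col + dc) ≠ player) := by unfold pvG at h1; tauto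
    rw [if_pos hb]
    simp [h1]


-- "causal order": every element's lookahead neighbour, if in bounds, was already seen (in S)
def pvCg (rows cols dr dc : Int) : (Int × Int → Prop) → List (Int × Int) → Prop
  | _, [] => True
  | S, x :: rest =>
    ((0 ≤ x.1 + dr ∧ x.1 + dr < rows ∧ 0 ≤ x.2 + dc ∧ x.2 + dc < cols) →
      S (x.1 + dr, x.2 + dc)) ∧
    pvCg rows cols dr dc (fun k => S k ∨ k = x) rest

theorem pvCg_mono (rows cols dr dc : Int) :
    ∀ (l : List (Int × Int)) (S S' : Int × Int → Prop),
      (∀ k, S k → S' k) → pvCg rows cols dr dc S l → pvCg rows cols dr dc S' l := by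
  intro l
  induction l with
  | nil => intro S S' _ _; trivial
  | cons x rest ih =>
    intro S S' hss h
    exact ⟨fun hb => hss _ (h.1 hb),
      ih _ _ (fun k hk => hk.elim (fun a => Or.inl (hss _ a)) Or.inr) h.2⟩

theorem pvCg_append (rows cols dr dc : Int) :
    ∀ (l1 l2 : List (Int × Int)) (S : Int × Int → Prop),
      pvCg rows cols dr dc S l1 →
      pvCg rows cols dr dc (fun k => S k ∨ k ∈ l1) l2 →
      pvCg rows cols dr dc S (l1 ++ l2) := by
  intro l1
  induction l1 with
  | nil =>
    intro l2 S _ h2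
    simpa using pvCg_mono rows cols dr dc l2 _ S (by simp) h2
  | cons x l1' ih =>
    intro l2 S h1 h2
    refine ⟨h1.1, ih l2 _ h1.2 ?_⟩
    refine pvCg_mono rows cols dr dc l2 _ _ ?_ h2
    intro k hk
    simp only [List.mem_cons] at hk
    tauto

-- a whole row whose lookahead lands in row r+dr, already fully covered by S
theorem pvCg_row_cross (rows cols dr dc : Int) (r : Int) :
    ∀ (cl : List Int) (S : Int × Int → Prop),
      (∀ c', 0 ≤ r + dr → r + dr < rows → 0 ≤ c' → c' < cols → S (r + dr, c')) →
      pvCg rows cols dr dc S (cl.map (fun c => (r, c))) := by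
  intro cl
  induction cl with
  | nil => intro S _; trivial
  | cons c cl' ih =>
    intro S hS
    refine ⟨fun hb => hS (c + dc) hb.1 hb.2.1 hb.2.2.1 hb.2.2.2, ?_⟩
    exact ih _ (fun c' h1 h2 h3 h4 => Or.inl (hS c' h1 h2 h3 h4))

-- a single row scanned right-to-left, direction (0,1): the lookahead is the previous element
theorem pvCg_row_right (rows cols : Int) (r : Int) :
    ∀ (n : Nat) (hi : Int), hi + 1 = (n : Int) →
      ∀ S : Int × Int → Prop, (0 ≤ hi + 1 → hi + 1 < cols → S (r, hi + 1)) →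
      pvCg rows cols 0 1 S ((PySem.List.pyRange hi (-1) (-1)).map (fun c => (r, c))) := by
  intro n
  induction n with
  | zero =>
    intro hi h0 S _
    rw [PySem.List.pyRange_neg_one_eq_nil (by omega)]
    trivial
  | succ m ih =>
    intro hi h0 S hS
    rw [PySem.List.pyRange_neg_one_cons (by omega : (-1 : Int) < hi)]
    refine ⟨fun hb => by simpa using hS (by omega) (by simpa using hb.2.2.2), ?_⟩
    have he : hi - 1 + 1 = hi := by omega
    have := ih (hi - 1) (by omega) (fun k => S k ∨ k = (r, hi))
      (fun _ _ => Or.inr (by rw [he]))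
    simpa [he] using this


-- all cells of the given rows, each row scanned right-to-left
def pvCells (cols : Int) (rowIter : List Int) : List (Int × Int) :=
  rowIter.flatMap (fun r => (PySem.List.pyRange (cols - 1) (-1) (-1)).map (fun c => (r, c)))

theorem pvCg_main_desc (rows cols dr dc : Int) (h0c : 0 ≤ cols)
    (hcase : (dr = 0 ∧ dc = 1) ∨ dr = 1) :
    ∀ (n : Nat) (hi : Int), hi + 1 = (n : Int) →
      ∀ S : Int × Int → Prop,
        (∀ k : Int × Int, hi < k.1 → k.1 < rows → 0 ≤ k.2 → k.2 < cols → S k) →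
        pvCg rows cols dr dc S (pvCells cols (PySem.List.pyRange hi (-1) (-1))) := by
  intro n
  induction n with
  | zero =>
    intro hi h0 S _
    rw [PySem.List.pyRange_neg_one_eq_nil (by omega)]
    trivial
  | succ m ih =>
    intro hi h0 S hS
    rw [PySem.List.pyRange_neg_one_cons (by omega : (-1 : Int) < hi)]
    unfold pvCells
    rw [List.flatMap_cons]
    apply pvCg_append
    · -- the block of row hi
      rcases hcase with ⟨hdr, hdc⟩ | hdr
      · subst hdr; subst hdc
        exact pvCg_row_right rows cols hi cols.toNat (cols - 1) (by omega) S
          (fun h1 h2 => absurd h2 (by omega))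
      · subst hdr
        exact pvCg_row_cross rows cols 1 dc hi _ S
          (fun c' h1 h2 h3 h4 => hS (hi + 1, c') (by omega) h2 h3 h4)
    · -- the remaining rows hi-1 … 0
      have := ih (hi - 1) (by omega) (fun k => S k ∨ k ∈ (PySem.List.pyRange (cols - 1) (-1) (-1)).map (fun c => (hi, c)))
        ?_
      · exact this
      · intro k hk1 hk2 hk3 hk4
        by_cases hk : hi < k.1
        · exact Or.inl (hS k hk hk2 hk3 hk4)
        · refine Or.inr ?_
          have hke : k = (hi, k.2) := by
            have : k.1 = hi := by omega
            exact Prod.ext this rfl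
          rw [hke]
          simp only [List.mem_map]
          exact ⟨k.2, by rw [PySem.List.mem_pyRange_neg_one]; omega, rfl⟩

theorem pvCg_main_asc (rows cols : Int) :
    ∀ (n : Nat) (lo : Int), rows - lo = (n : Int) →
      ∀ S : Int × Int → Prop,
        (∀ k : Int × Int, 0 ≤ k.1 → k.1 < lo → 0 ≤ k.2 → k.2 < cols → S k) →
        pvCg rows cols (-1) 1 S (pvCells cols (PySem.List.pyRange lo rows 1)) := by
  intro n
  induction n with
  | zero =>
    intro lo h0 S _
    rw [PySem.List.pyRange_one_eq_nil (by omega)]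
    trivial
  | succ m ih =>
    intro lo h0 S hS
    rw [PySem.List.pyRange_one_cons (by omega : lo < rows)]
    unfold pvCells
    rw [List.flatMap_cons]
    apply pvCg_append
    · exact pvCg_row_cross rows cols (-1) 1 lo _ S
        (fun c' h1 h2 h3 h4 => hS (lo + -1, c') h1 (by omega) h3 h4)
    · have := ih (lo + 1) (by omega) (fun k => S k ∨ k ∈ (PySem.List.pyRange (cols - 1) (-1) (-1)).map (fun c => (lo, c)))
        ?_
      · exact this
      · intro k hk1 hk2 hk3 hk4
        by_cases hk : k.1 < lo
        · exact Or.inl (hS k hk1 hk hk3 hk4)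
        · refine Or.inr ?_
          have hke : k = (lo, k.2) := by
            have : k.1 = lo := by omega
            exact Prod.ext this rfl
          rw [hke]
          simp only [List.mem_map]
          exact ⟨k.2, by rw [PySem.List.mem_pyRange_neg_one]; omega, rfl⟩


theorem pvFoldInv (matrix : List (List Int)) (player rows cols dr dc : Int)
    (hd : 0 < dr ∨ dr < 0 ∨ 0 < dc) :
    ∀ (todo : List (Int × Int)) (S : Int × Int → Prop)
      (dict : PySem.Dict (Int × Int) Int),
      (∀ x ∈ todo, 0 ≤ x.1 ∧ x.1 < rows ∧ 0 ≤ x.2 ∧ x.2 < cols) →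
      (∀ key, S key → dict.getD key 0 = pvRunLen matrix player rows cols dr dc key.1 key.2) →
      (∀ key, ¬ S key → dict.getD key 0 = 0) →
      pvCg rows cols dr dc S todo →
      (∀ key, (S key ∨ key ∈ todo) →
        (todo.foldl (pvRunStep matrix player dr dc) dict).getD key 0 =
          pvRunLen matrix player rows cols dr dc key.1 key.2) ∧
      (∀ key, ¬(S key ∨ key ∈ todo) →
        (todo.foldl (pvRunStep matrix player dr dc) dict).getD key 0 = 0) := by
  intro todo
  induction todo with
  | nil =>
    intro S dict _ h1 h0 _
    exact ⟨fun key hk => h1 key (by simpa using hk), fun key hk => h0 key (by simpa using hk)⟩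
  | cons x rest ih =>
    intro S dict hin h1 h0 hCg
    have hx := hin x (List.mem_cons_self ..)
    -- the looked-up neighbour value is always the true run length
    have hnb : dict.getD (x.1 + dr, x.2 + dc) 0 =
        pvRunLen matrix player rows cols dr dc (x.1 + dr) (x.2 + dc) := by
      by_cases hb : 0 ≤ x.1 + dr ∧ x.1 + dr < rows ∧ 0 ≤ x.2 + dc ∧ x.2 + dc < cols
      · exact h1 _ (hCg.1 hb)
      · have hz : pvRunLen matrix player rows cols dr dc (x.1 + dr) (x.2 + dc) = 0 := by
          rw [pvRunLen_eq _ _ _ _ _ _ _ _ hd, if_neg]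
          unfold pvG; tauto
        rw [hz]
        by_cases hs : S (x.1 + dr, x.2 + dc)
        · rw [h1 _ hs, hz]
        · exact h0 _ hs
    have hz_of : pvCell matrix x.1 x.2 ≠ player →
        pvRunLen matrix player rows cols dr dc x.1 x.2 = 0 := by
      intro hcell
      rw [pvRunLen_eq _ _ _ _ _ _ _ _ hd, if_neg]
      unfold pvG; tauto
    have h1' : ∀ key, (fun k => S k ∨ k = x) key →
        (pvRunStep matrix player dr dc dict x).getD key 0 =
          pvRunLen matrix player rows cols dr dc key.1 key.2 := by
      intro key hk
      unfold pvRunStep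
      by_cases hcell : pvCell matrix x.1 x.2 = player
      · rw [if_pos hcell, PySem.Dict.getD_insert]
        by_cases hkx : key = x
        · rw [if_pos hkx, hkx, hnb,
            pvRunLen_eq matrix player rows cols dr dc x.1 x.2 hd, if_pos]
          unfold pvG; tauto
        · rw [if_neg hkx]
          exact h1 _ (hk.resolve_right hkx)
      · rw [if_neg hcell]
        rcases hk with hs | hkx
        · exact h1 _ hs
        · subst hkx
          by_cases hs : S key
          · exact h1 _ hs
          · rw [h0 _ hs, hz_of hcell]
    have h0' : ∀ key, ¬(fun k => S k ∨ k = x) key →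
        (pvRunStep matrix player dr dc dict x).getD key 0 = 0 := by
      intro key hk
      unfold pvRunStep
      by_cases hcell : pvCell matrix x.1 x.2 = player
      · rw [if_pos hcell, PySem.Dict.getD_insert,
          if_neg (fun h => hk (Or.inr h))]
        exact h0 _ (fun hs => hk (Or.inl hs))
      · rw [if_neg hcell]
        exact h0 _ (fun hs => hk (Or.inl hs))
    have := ih (fun k => S k ∨ k = x) (pvRunStep matrix player dr dc dict x)
      (fun y hy => hin y (List.mem_cons_of_mem _ hy)) h1' h0' hCg.2
    simp only [List.foldl_cons]
    refine ⟨fun key hk => this.1 key ?_, fun key hk => this.2 key ?_⟩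
    · simp only [List.mem_cons] at hk; tauto
    · simp only [List.mem_cons] at hk; tauto


theorem pvTable_getD_desc (matrix : List (List Int)) (player rows cols dr dc : Int)
    (h0r : 0 ≤ rows) (h0c : 0 ≤ cols) (hdr : ¬ dr < 0)
    (hcase : (dr = 0 ∧ dc = 1) ∨ dr = 1) :
    ∀ key : Int × Int, (pvRunTable matrix player rows cols dr dc).getD key 0 =
      pvRunLen matrix player rows cols dr dc key.1 key.2 := by
  have hd : 0 < dr ∨ dr < 0 ∨ 0 < dc := by rcases hcase with ⟨h1, h2⟩ | h1 <;> omega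
  have hfold : ∀ (rl : List Int) (init : PySem.Dict (Int × Int) Int),
      rl.foldl (fun run r => (PySem.List.pyRange (cols - 1) (-1) (-1)).foldl
        (fun run c => pvRunStep matrix player dr dc run (r, c)) run) init =
      (pvCells cols rl).foldl (pvRunStep matrix player dr dc) init := by
    intro rl init
    unfold pvCells
    rw [List.foldl_flatMap]
    simp only [List.foldl_map]
  have hin : ∀ x ∈ pvCells cols (PySem.List.pyRange (rows - 1) (-1) (-1)),
      0 ≤ x.1 ∧ x.1 < rows ∧ 0 ≤ x.2 ∧ x.2 < cols := by
    intro x hx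
    unfold pvCells at hx
    simp only [List.mem_flatMap, List.mem_map] at hx
    obtain ⟨r, hr, c, hc, hxe⟩ := hx
    rw [PySem.List.mem_pyRange_neg_one] at hr hc
    rw [← hxe]
    exact ⟨by omega, by omega, by omega, by omega⟩
  have hCg := pvCg_main_desc rows cols dr dc h0c hcase rows.toNat (rows - 1) (by omega)
    (fun _ => False) (fun k h1 h2 _ _ => by omega)
  obtain ⟨P1, P2⟩ := pvFoldInv matrix player rows cols dr dc hd
    (pvCells cols (PySem.List.pyRange (rows - 1) (-1) (-1))) (fun _ => False)
    PySem.Dict.empty hin (fun key h => h.elim)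
    (fun key _ => by rw [PySem.Dict.getD_empty]) hCg
  intro key
  unfold pvRunTable
  rw [if_neg hdr, hfold]
  by_cases hk : key ∈ pvCells cols (PySem.List.pyRange (rows - 1) (-1) (-1))
  · exact P1 key (Or.inr hk)
  · rw [P2 key (by tauto)]
    rw [pvRunLen_eq _ _ _ _ _ _ _ _ hd, if_neg]
    intro hG
    apply hk
    unfold pvCells
    simp only [List.mem_flatMap, List.mem_map]
    refine ⟨key.1, ?_, key.2, ?_, rfl⟩
    · rw [PySem.List.mem_pyRange_neg_one]
      unfold pvG at hG; omega
    · rw [PySem.List.mem_pyRange_neg_one]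
      unfold pvG at hG; omega

theorem pvTable_getD_asc (matrix : List (List Int)) (player rows cols : Int)
    (h0r : 0 ≤ rows) (h0c : 0 ≤ cols) :
    ∀ key : Int × Int, (pvRunTable matrix player rows cols (-1) 1).getD key 0 =
      pvRunLen matrix player rows cols (-1) 1 key.1 key.2 := by
  have hd : (0 : Int) < -1 ∨ (-1 : Int) < 0 ∨ (0 : Int) < 1 := by omega
  have hfold : ∀ (rl : List Int) (init : PySem.Dict (Int × Int) Int),
      rl.foldl (fun run r => (PySem.List.pyRange (cols - 1) (-1) (-1)).foldl
        (fun run c => pvRunStep matrix player (-1) 1 run (r, c)) run) init =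
      (pvCells cols rl).foldl (pvRunStep matrix player (-1) 1) init := by
    intro rl init
    unfold pvCells
    rw [List.foldl_flatMap]
    simp only [List.foldl_map]
  have hin : ∀ x ∈ pvCells cols (PySem.List.pyRange 0 rows 1),
      0 ≤ x.1 ∧ x.1 < rows ∧ 0 ≤ x.2 ∧ x.2 < cols := by
    intro x hx
    unfold pvCells at hx
    simp only [List.mem_flatMap, List.mem_map] at hx
    obtain ⟨r, hr, c, hc, hxe⟩ := hx
    rw [PySem.List.mem_pyRange_one] at hr
    rw [PySem.List.mem_pyRange_neg_one] at hc
    rw [← hxe]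
    exact ⟨by omega, by omega, by omega, by omega⟩
  have hCg := pvCg_main_asc rows cols rows.toNat 0 (by omega)
    (fun _ => False) (fun k h1 h2 _ _ => by omega)
  obtain ⟨P1, P2⟩ := pvFoldInv matrix player rows cols (-1) 1 hd
    (pvCells cols (PySem.List.pyRange 0 rows 1)) (fun _ => False)
    PySem.Dict.empty hin (fun key h => h.elim)
    (fun key _ => by rw [PySem.Dict.getD_empty]) hCg
  intro key
  unfold pvRunTable
  rw [if_pos (by omega : (-1 : Int) < 0), hfold]
  by_cases hk : key ∈ pvCells cols (PySem.List.pyRange 0 rows 1)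
  · exact P1 key (Or.inr hk)
  · rw [P2 key (by tauto)]
    rw [pvRunLen_eq _ _ _ _ _ _ _ _ hd, if_neg]
    intro hG
    apply hk
    unfold pvCells
    simp only [List.mem_flatMap, List.mem_map]
    refine ⟨key.1, ?_, key.2, ?_, rfl⟩
    · rw [PySem.List.mem_pyRange_one]
      unfold pvG at hG; omega
    · rw [PySem.List.mem_pyRange_neg_one]
      unfold pvG at hG; omega


theorem pvAnyCongr {α : Type} (l : List α) (p q : α → Bool) (h : ∀ a ∈ l, p a = q a) :
    l.any p = l.any q := by
  induction l with
  | nil => rfl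
  | cons x xs ih => simp_all

theorem pvDir01 (matrix : List (List Int)) (player rows cols row col : Int)
    (h0r : 0 ≤ rows) (h0c : 0 ≤ cols) :
    (decide (col ≤ cols - 4) && pvCheckLine matrix rows cols player 3 row col 0 1) =
    decide (3 ≤ (pvRunTable matrix player rows cols 0 1).getD (row + 0, col + 1) 0) := by
  rw [pvTable_getD_desc matrix player rows cols 0 1 h0r h0c (by omega) (Or.inl ⟨rfl, rfl⟩)]
  rw [Bool.eq_iff_iff]
  simp only [Bool.and_eq_true, decide_eq_true_eq, pvCheckLine_eq3,
    pvRunLen_ge3 matrix player rows cols 0 1 _ _ (by omega)]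
  constructor
  · rintro ⟨-, h⟩; exact h
  · intro h
    refine ⟨?_, h⟩
    obtain ⟨-, -, -, h34, -⟩ := h.2.2
    omega

theorem pvDir10 (matrix : List (List Int)) (player rows cols row col : Int)
    (h0r : 0 ≤ rows) (h0c : 0 ≤ cols) :
    (decide (row ≤ rows - 4) && pvCheckLine matrix rows cols player 3 row col 1 0) =
    decide (3 ≤ (pvRunTable matrix player rows cols 1 0).getD (row + 1, col + 0) 0) := by
  rw [pvTable_getD_desc matrix player rows cols 1 0 h0r h0c (by omega) (Or.inr rfl)]
  rw [Bool.eq_iff_iff]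
  simp only [Bool.and_eq_true, decide_eq_true_eq, pvCheckLine_eq3,
    pvRunLen_ge3 matrix player rows cols 1 0 _ _ (by omega)]
  constructor
  · rintro ⟨-, h⟩; exact h
  · intro h
    refine ⟨?_, h⟩
    obtain ⟨-, h32, -, -, -⟩ := h.2.2
    omega

theorem pvDir11 (matrix : List (List Int)) (player rows cols row col : Int)
    (h0r : 0 ≤ rows) (h0c : 0 ≤ cols) :
    (decide (row ≤ rows - 4) && decide (col ≤ cols - 4) &&
      pvCheckLine matrix rows cols player 3 row col 1 1) =
    decide (3 ≤ (pvRunTable matrix player rows cols 1 1).getD (row + 1, col + 1) 0) := by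
  rw [pvTable_getD_desc matrix player rows cols 1 1 h0r h0c (by omega) (Or.inr rfl)]
  rw [Bool.eq_iff_iff]
  simp only [Bool.and_eq_true, decide_eq_true_eq, pvCheckLine_eq3,
    pvRunLen_ge3 matrix player rows cols 1 1 _ _ (by omega)]
  constructor
  · rintro ⟨-, h⟩; exact h
  · intro h
    refine ⟨⟨?_, ?_⟩, h⟩ <;>
    · obtain ⟨-, h32, -, h34, -⟩ := h.2.2
      omega

theorem pvDirM11 (matrix : List (List Int)) (player rows cols row col : Int)
    (h0r : 0 ≤ rows) (h0c : 0 ≤ cols) :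
    (decide (3 ≤ row) && decide (col ≤ cols - 4) &&
      pvCheckLine matrix rows cols player 3 row col (-1) 1) =
    decide (3 ≤ (pvRunTable matrix player rows cols (-1) 1).getD (row + -1, col + 1) 0) := by
  rw [pvTable_getD_asc matrix player rows cols h0r h0c]
  rw [Bool.eq_iff_iff]
  simp only [Bool.and_eq_true, decide_eq_true_eq, pvCheckLine_eq3,
    pvRunLen_ge3 matrix player rows cols (-1) 1 _ _ (by omega)]
  constructor
  · rintro ⟨-, h⟩; exact h
  · intro h
    refine ⟨⟨?_, ?_⟩, h⟩ <;>
    · obtain ⟨h31, -, -, h34, -⟩ := h.2.2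
      omega

theorem pvPortsEq (matrix : List (List Int)) (player : Int) :
    can_win_in_next_move matrix player = can_win_in_next_move_alt matrix player := by
  unfold can_win_in_next_move can_win_in_next_move_alt
  have h0r : (0 : Int) ≤ (matrix.length : Int) := by positivity
  have h0c : (0 : Int) ≤ (matrix.headI.length : Int) := by positivity
  simp only [List.map_cons, List.map_nil, List.any_cons, List.any_nil, Bool.or_false]
  apply pvAnyCongr
  intro row _
  apply pvAnyCongr
  intro col _
  congr 1
  rw [← pvDir01 matrix player _ _ row col h0r h0c,
      ← pvDir10 matrix player _ _ row col h0r h0c,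
      ← pvDir11 matrix player _ _ row col h0r h0c,
      ← pvDirM11 matrix player _ _ row col h0r h0c]
  simp [Bool.or_assoc]

-- ===== VERDICT (by name: the statement is the Claim_ definition above) =====
theorem can_win_in_next_move_spec : Claim_equal_can_win_in_next_move := by
  intro matrix player _ _
  unfold Spec_can_win_in_next_move
  exact pvPortsEq matrix player
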